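-- pv_equiv track=rewrite | github.com/tfcp68/manual-projects | Исходники/Глава 2. Часть 1/Динамическое программирование1/Динамическое программирование1/Табличный метод/17. Черепашка и монетки/Python/tutrle_point.py | turtle_point_back
-- ===== SOURCE A (Python) =====
-- def turtle_point_back(n, m, coins):
--     if n <= 0 or m <= 0:
--         return -1
--     matrix = [[0 for _ in range(n)] for _ in range(m)]
--     matrix[0][0] = coins[0][0]
--     for j in range(m):
--         for i in range(n):
--             if i == 0 and j == 0:
--                 continue
--             if i != 0:
--                 matrix[j][i] = max(matrix[j][i - 1] + coins[j][i], matrix[j][i])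
--             if j != 0:
--                 matrix[j][i] = max(matrix[j - 1][i] + coins[j][i], matrix[j][i])
--     return matrix[m - 1][n - 1]
-- ===== SOURCE B (Python) =====
-- def turtle_point_back(n, m, coins):
--     """Top-down on demand: value(0,0) = coins[0][0]; otherwise
--     value(j,i) = max(0, coins[j][i] + best entering neighbour),
--     computed by memoized recursion from the target corner."""
--     if n <= 0 or m <= 0:
--         return -1
--     cache = {}
--
--     def value(j, i):
--         if (j, i) not in cache:
--             if j == 0 and i == 0:
--                 cache[j, i] = coins[0][0]
--             else:
--                 if j == 0:
--                     back = value(j, i - 1)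
--                 elif i == 0:
--                     back = value(j - 1, i)
--                 else:
--                     back = max(value(j, i - 1), value(j - 1, i))
--                 cache[j, i] = max(0, back + coins[j][i])
--         return cache[j, i]
--
--     return value(m - 1, n - 1)
-- ===== Notes on version B (the rewrite author's own statement) =====
-- stated objective: alternative
-- what changed: A fills a preallocated m×n table bottom-up with two in-place max-updates per cell and reads the corner; B computes the corner by top-down memoized recursion over the dependency structure (value(j,i) from its left/up neighbours, cached in a dict), touching cells only as demanded.
import Mathlib
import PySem

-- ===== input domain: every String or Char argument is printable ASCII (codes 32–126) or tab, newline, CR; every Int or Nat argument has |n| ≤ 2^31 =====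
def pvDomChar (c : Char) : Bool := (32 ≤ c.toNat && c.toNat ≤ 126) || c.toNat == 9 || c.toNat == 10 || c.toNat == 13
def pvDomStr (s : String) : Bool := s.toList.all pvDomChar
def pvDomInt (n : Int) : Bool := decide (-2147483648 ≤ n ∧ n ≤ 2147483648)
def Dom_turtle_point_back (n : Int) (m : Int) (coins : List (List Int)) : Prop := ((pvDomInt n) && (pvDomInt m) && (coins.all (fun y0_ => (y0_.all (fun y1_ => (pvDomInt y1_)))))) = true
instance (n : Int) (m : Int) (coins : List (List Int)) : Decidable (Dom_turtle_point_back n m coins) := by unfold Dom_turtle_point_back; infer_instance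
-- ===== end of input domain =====

-- B replaces A's bottom-up in-place m×n DP table by a top-down memoized recursion
-- over the dependency structure (value(j,i) from its left/up neighbours, cached in
-- a dict); same return value.

-- ===== PORT A =====
-- matrix[j][i] and coins[j][i] reads/writes: indices are ≥ 0 and (under Pre_) in
-- range at every use site, so pyGetD/pySetD are exact there.
def pvAGet (mat : List (List Int)) (j i : Int) : Int :=
  PySem.List.pyGetD (PySem.List.pyGetD mat j []) i 0

def pvASet (mat : List (List Int)) (j i : Int) (v : Int) : List (List Int) :=
  PySem.List.pySetD mat j (PySem.List.pySetD (PySem.List.pyGetD mat j []) i v)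

-- the two assignment statements of A's inner loop body, in order
def pvUpd1 (coins : List (List Int)) (j : Int) (matrix : List (List Int)) (i : Int) : List (List Int) :=
  if i ≠ 0 then pvASet matrix j i (max (pvAGet matrix j (i-1) + pvAGet coins j i) (pvAGet matrix j i)) else matrix

def pvUpd2 (coins : List (List Int)) (j : Int) (matrix : List (List Int)) (i : Int) : List (List Int) :=
  if j ≠ 0 then pvASet matrix j i (max (pvAGet matrix (j-1) i + pvAGet coins j i) (pvAGet matrix j i)) else matrix

-- the body of A's inner 'for i in range(n)' loop
def pvBody (coins : List (List Int)) (j : Int) (matrix : List (List Int)) (i : Int) : List (List Int) :=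
  if i = 0 ∧ j = 0 then matrix
  else pvUpd2 coins j (pvUpd1 coins j matrix i) i

-- the body of A's outer 'for j in range(m)' loop
def pvOuter (coins : List (List Int)) (n : Int) (matrix : List (List Int)) (j : Int) : List (List Int) :=
  (PySem.List.pyRange 0 n 1).foldl (pvBody coins j) matrix

def turtle_point_back (n : Int) (m : Int) (coins : List (List Int)) : Int :=
  if n ≤ 0 ∨ m ≤ 0 then -1
  else
    let matrix : List (List Int) := List.replicate m.toNat (List.replicate n.toNat 0)
    let matrix := pvASet matrix 0 0 (pvAGet coins 0 0)
    let matrix := (PySem.List.pyRange 0 m 1).foldl (pvOuter coins n) matrix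
    pvAGet matrix (m-1) (n-1)

-- ===== PORT B =====
-- coins[j][i] in B's recursion: j, i are ≥ 0 (Python ints counting down from
-- m-1, n-1) and in range under Pre_, so Nat indices with getD are exact there.
def pvCell (coins : List (List Int)) (j i : Nat) : Int := (coins.getD j []).getD i 0

-- Source B's inner 'value(j, i)': checks the cache, otherwise recurses on the
-- left/up neighbour(s), stores, and returns the cached value; the pair threads
-- the mutable dict 'cache'.
def pvValue (coins : List (List Int)) (j i : Nat) (cache : PySem.Dict (Nat × Nat) Int) :
    Int × PySem.Dict (Nat × Nat) Int :=
  let cache' :=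
    if (cache.get? (j, i)).isSome then cache        -- '(j, i) not in cache' test
    else if _h0 : j = 0 ∧ i = 0 then
      cache.insert (j, i) (pvCell coins 0 0)
    else
      let backc :=
        if _hj : j = 0 then pvValue coins j (i - 1) cache
        else if _hi : i = 0 then pvValue coins (j - 1) i cache
        else
          let ac := pvValue coins j (i - 1) cache
          let bc := pvValue coins (j - 1) i ac.2
          (max ac.1 bc.1, bc.2)
      backc.2.insert (j, i) (max 0 (backc.1 + pvCell coins j i))
  (cache'.getD (j, i) 0, cache')                    -- 'return cache[j, i]' (key present)
termination_by j + i
decreasing_by all_goals omega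

def turtle_point_back_alt (n : Int) (m : Int) (coins : List (List Int)) : Int :=
  if n ≤ 0 ∨ m ≤ 0 then -1
  else (pvValue coins (m - 1).toNat (n - 1).toNat PySem.Dict.empty).1

-- ===== PRECONDITION & SPEC =====
-- Pre_: when the loops run (0 < n and 0 < m), coins must supply the m×n cells A
-- reads (otherwise Python A raises IndexError on coins[j][i]).
def Pre_turtle_point_back (n : Int) (m : Int) (coins : List (List Int)) : Prop :=
  0 < n → 0 < m → (m ≤ (coins.length : Int) ∧ ∀ row ∈ coins.take m.toNat, n ≤ (row.length : Int))
instance (n : Int) (m : Int) (coins : List (List Int)) : Decidable (Pre_turtle_point_back n m coins) := by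
  unfold Pre_turtle_point_back; infer_instance

def pvWitness_turtle_point_back : Int × Int × List (List Int) := (2, 2, [[1, -2], [3, 4]])

def Spec_turtle_point_back (n : Int) (m : Int) (coins : List (List Int)) (out : Int) : Prop := out = turtle_point_back_alt n m coins
instance (n : Int) (m : Int) (coins : List (List Int)) (out : Int) : Decidable (Spec_turtle_point_back n m coins out) := by unfold Spec_turtle_point_back; infer_instance

-- ===== CLAIM (what is proved, stated in full; the proofs are below) =====
def Claim_equal_turtle_point_back : Prop := ∀ (n : Int) (m : Int) (coins : List (List Int)), Dom_turtle_point_back n m coins → Pre_turtle_point_back n m coins → Spec_turtle_point_back n m coins (turtle_point_back n m coins)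

-- ===== LEMMAS AND PROOFS =====

-- the common value both programs compute at cell (j,i): literally A's update order
def pvG (c : Nat → Nat → Int) : Nat → Nat → Int
  | 0, 0 => c 0 0
  | 0, i+1 => max (pvG c 0 i + c 0 (i+1)) 0
  | j+1, 0 => max (pvG c j 0 + c (j+1) 0) 0
  | j+1, i+1 => max (pvG c j (i+1) + c (j+1) (i+1)) (max (pvG c (j+1) i + c (j+1) (i+1)) 0)

-- cell accessor used by the invariants
def pvC (coins : List (List Int)) (j i : Nat) : Int := (coins.getD j []).getD i 0

-- ---- generic list helpers ----
lemma pv_getD_mid {α : Type} (l r : List α) (x d : α) : (l ++ x :: r).getD l.length d = x := by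
  simp [List.getD]

lemma pv_set_mid {α : Type} (l r : List α) (x v : α) : (l ++ x :: r).set l.length v = l ++ v :: r := by
  simp

lemma pv_getD_map_range {α : Type} (f : Nat → α) (N k : Nat) (h : k < N) (d : α) :
    ((List.range N).map f).getD k d = f k := by simp [List.getD, h]

lemma pv_snoc {α : Type} (f : Nat → α) (k : Nat) (l : List α) :
    (List.range k).map f ++ f k :: l = (List.range (k+1)).map f ++ l := by
  rw [List.range_succ]; simp

lemma pv_prefix_getD_lt (f : Nat → Int) (k t x : Nat) (hx : x < k) :
    ((List.range k).map f ++ List.replicate t (0:Int)).getD x 0 = f x := by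
  rw [List.getD_append _ _ _ _ (by simp [hx])]
  exact pv_getD_map_range f k x hx 0

lemma pv_prefix_getD_ge (f : Nat → Int) (k t x : Nat) (hx : k ≤ x) (hx2 : x < k + t) :
    ((List.range k).map f ++ List.replicate t (0:Int)).getD x 0 = 0 := by
  rw [List.getD_append_right _ _ _ _ (by simp [hx])]
  rw [List.getD_replicate _ (by simp; omega)]

lemma pv_prefix_set (f : Nat → Int) (k t : Nat) (ht : 1 ≤ t) (v : Int) :
    ((List.range k).map f ++ List.replicate t (0:Int)).set k v
      = (List.range k).map f ++ v :: List.replicate (t-1) 0 := by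
  obtain ⟨t', rfl⟩ : ∃ t', t = t' + 1 := ⟨t - 1, by omega⟩
  rw [List.set_append, if_neg (by simp), List.replicate_succ]
  simp

-- ---- A-side access lemmas ----
lemma pvAGet_nat (mat : List (List Int)) (j i : Nat) :
    pvAGet mat (j : Int) (i : Int) = (mat.getD j []).getD i 0 := by
  simp [pvAGet]

lemma pvASet_nat (mat : List (List Int)) (j i : Nat) (v : Int) :
    pvASet mat (j : Int) (i : Int) v = mat.set j ((mat.getD j []).set i v) := by
  simp [pvASet]

-- one inner-loop step of A on row j = J+1
lemma pvStepA_pos (coins : List (List Int)) (J N k : Nat) (done rest : List (List Int))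
    (hd : done.length = J + 1)
    (hprev : done.getD J [] = (List.range N).map (pvG (pvC coins) J))
    (hk : k < N) :
    pvBody coins ((J:Int)+1)
      (done ++ (((List.range k).map (pvG (pvC coins) (J+1))) ++ List.replicate (N-k) (0:Int)) :: rest)
      (k : Int)
    = done ++ (((List.range (k+1)).map (pvG (pvC coins) (J+1))) ++ List.replicate (N-(k+1)) (0:Int)) :: rest := by
  have hcastj : ((J:Int)+1) = ((J+1 : Nat) : Int) := by push_cast; ring
  set c := pvC coins with hc
  set cur := ((List.range k).map (pvG c (J+1))) ++ List.replicate (N-k) (0:Int) with hcur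
  have hmid : (done ++ cur :: rest).getD (J+1) [] = cur := by
    rw [← hd]; exact pv_getD_mid _ _ _ _
  have hdown : (done ++ cur :: rest).getD J [] = (List.range N).map (pvG c J) := by
    rw [List.getD_append _ _ _ _ (by omega), hprev]
  have hcoins : ∀ x : Nat, pvAGet coins ((J:Int)+1) (x:Int) = c (J+1) x := by
    intro x; rw [hcastj, pvAGet_nat]; rfl
  rcases Nat.eq_zero_or_pos k with hk0 | hkpos
  · subst hk0
    unfold pvBody
    rw [if_neg (by push_cast; omega)]
    unfold pvUpd1
    rw [if_neg (by simp)]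
    unfold pvUpd2
    rw [if_pos (by omega)]
    have rD : pvAGet (done ++ cur :: rest) ((J:Int)+1-1) ((0:Nat):Int) = pvG c J 0 := by
      have h1 : ((J:Int)+1-1) = ((J:Nat):Int) := by ring
      rw [h1, pvAGet_nat, hdown]
      exact pv_getD_map_range _ _ _ (by omega) _
    have r0 : pvAGet (done ++ cur :: rest) ((J:Int)+1) ((0:Nat):Int) = 0 := by
      rw [hcastj, pvAGet_nat, hmid, hcur]
      exact pv_prefix_getD_ge _ _ _ _ (by omega) (by simp; omega)
    rw [rD, r0, hcoins 0]
    have hv : max (pvG c J 0 + c (J+1) 0) 0 = pvG c (J+1) 0 := by simp [pvG]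
    rw [hv]
    rw [hcastj, pvASet_nat, hmid, hcur]
    rw [pv_prefix_set _ _ _ (by omega), pv_snoc, ← hd, pv_set_mid]
    have h2 : N - 0 - 1 = N - (0+1) := by omega
    rw [h2]
  · obtain ⟨k', rfl⟩ : ∃ k', k = k' + 1 := ⟨k - 1, by omega⟩
    unfold pvBody
    rw [if_neg (by push_cast; omega)]
    unfold pvUpd1
    rw [if_pos (by push_cast; omega)]
    have hci : (((k'+1:Nat)):Int) - 1 = ((k':Nat):Int) := by push_cast; ring
    have r1 : pvAGet (done ++ cur :: rest) ((J:Int)+1) ((((k'+1:Nat)):Int) - 1) = pvG c (J+1) k' := by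
      rw [hci, hcastj, pvAGet_nat, hmid, hcur]
      exact pv_prefix_getD_lt _ _ _ _ (by omega)
    have r2 : pvAGet (done ++ cur :: rest) ((J:Int)+1) (((k'+1:Nat)):Int) = 0 := by
      rw [hcastj, pvAGet_nat, hmid, hcur]
      exact pv_prefix_getD_ge _ _ _ _ (by omega) (by omega)
    rw [r1, r2, hcoins (k'+1)]
    set v1 := max (pvG c (J+1) k' + c (J+1) (k'+1)) 0 with hv1
    have s1 : pvASet (done ++ cur :: rest) ((J:Int)+1) (((k'+1:Nat)):Int) v1
        = done ++ (((List.range (k'+1)).map (pvG c (J+1))) ++ v1 :: List.replicate (N-(k'+1)-1) 0) :: rest := by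
      rw [hcastj, pvASet_nat, hmid, hcur]
      rw [pv_prefix_set _ _ _ (by omega) v1, ← hd, pv_set_mid]
    rw [s1]
    set cur1 := ((List.range (k'+1)).map (pvG c (J+1))) ++ v1 :: List.replicate (N-(k'+1)-1) (0:Int) with hcur1
    unfold pvUpd2
    rw [if_pos (by omega)]
    have hmid1 : (done ++ cur1 :: rest).getD (J+1) [] = cur1 := by
      rw [← hd]; exact pv_getD_mid _ _ _ _
    have hdown1 : (done ++ cur1 :: rest).getD J [] = (List.range N).map (pvG c J) := by
      rw [List.getD_append _ _ _ _ (by omega), hprev]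
    have r3 : pvAGet (done ++ cur1 :: rest) ((J:Int)+1-1) (((k'+1:Nat)):Int) = pvG c J (k'+1) := by
      have h1 : ((J:Int)+1-1) = ((J:Nat):Int) := by ring
      rw [h1, pvAGet_nat, hdown1]
      exact pv_getD_map_range _ _ _ (by omega) _
    have hl : ((List.range (k'+1)).map (pvG c (J+1))).length = k'+1 := by simp
    have r4 : pvAGet (done ++ cur1 :: rest) ((J:Int)+1) (((k'+1:Nat)):Int) = v1 := by
      rw [hcastj, pvAGet_nat, hmid1, hcur1]
      have h := pv_getD_mid ((List.range (k'+1)).map (pvG c (J+1))) (List.replicate (N-(k'+1)-1) (0:Int)) v1 (0:Int)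
      rw [hl] at h
      exact h
    rw [r3, r4, hcoins (k'+1)]
    have hv2 : max (pvG c J (k'+1) + c (J+1) (k'+1)) v1 = pvG c (J+1) (k'+1) := by
      rw [hv1]; simp [pvG]
    rw [hv2]
    rw [hcastj, pvASet_nat, hmid1, hcur1]
    have hset := pv_set_mid ((List.range (k'+1)).map (pvG c (J+1))) (List.replicate (N-(k'+1)-1) (0:Int)) v1 (pvG c (J+1) (k'+1))
    rw [hl] at hset
    rw [hset, pv_snoc, ← hd, pv_set_mid]
    have h2 : N - (k'+1) - 1 = N - (k'+1+1) := by omega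
    rw [h2]

-- one inner-loop step of A on row 0 (i ≥ 1)
lemma pvStepA_zero (coins : List (List Int)) (N k : Nat) (rest : List (List Int))
    (hk1 : 1 ≤ k) (hk : k < N) :
    pvBody coins 0
      ((((List.range k).map (pvG (pvC coins) 0)) ++ List.replicate (N-k) (0:Int)) :: rest)
      (k : Int)
    = (((List.range (k+1)).map (pvG (pvC coins) 0)) ++ List.replicate (N-(k+1)) (0:Int)) :: rest := by
  obtain ⟨k', rfl⟩ : ∃ k', k = k' + 1 := ⟨k - 1, by omega⟩
  set c := pvC coins with hc
  set cur := ((List.range (k'+1)).map (pvG c 0)) ++ List.replicate (N-(k'+1)) (0:Int) with hcur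
  have hmid : ∀ r : List (List Int), (cur :: r).getD 0 [] = cur := fun _ => rfl
  unfold pvBody
  rw [if_neg (by push_cast; omega)]
  unfold pvUpd1
  rw [if_pos (by push_cast; omega)]
  have hci : (((k'+1:Nat)):Int) - 1 = ((k':Nat):Int) := by push_cast; ring
  have h00 : ((0:Int)) = ((0:Nat):Int) := by norm_num
  have r1 : pvAGet (cur :: rest) 0 ((((k'+1:Nat)):Int) - 1) = pvG c 0 k' := by
    rw [hci, h00, pvAGet_nat]
    exact pv_prefix_getD_lt _ _ _ _ (by omega)
  have r2 : pvAGet (cur :: rest) 0 (((k'+1:Nat)):Int) = 0 := by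
    rw [h00, pvAGet_nat]
    exact pv_prefix_getD_ge _ _ _ _ (by omega) (by omega)
  have r3 : pvAGet coins 0 (((k'+1:Nat)):Int) = c 0 (k'+1) := by
    rw [h00, pvAGet_nat]; rfl
  rw [r1, r2, r3]
  have hv : max (pvG c 0 k' + c 0 (k'+1)) 0 = pvG c 0 (k'+1) := by simp [pvG]
  rw [hv]
  have s1 : pvASet (cur :: rest) 0 (((k'+1:Nat)):Int) (pvG c 0 (k'+1))
      = (((List.range (k'+1+1)).map (pvG c 0)) ++ List.replicate (N-(k'+1+1)) 0) :: rest := by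
    rw [h00, pvASet_nat]
    have : ((cur :: rest).getD 0 []) = cur := rfl
    rw [this, hcur, pv_prefix_set _ _ _ (by omega), pv_snoc]
    have h2 : N - (k'+1) - 1 = N - (k'+1+1) := by omega
    rw [h2]
    rfl
  rw [s1]
  unfold pvUpd2
  rw [if_neg (by norm_num)]

-- the inner loop of A over the remaining indices, row j = J+1
lemma pvInnerA_pos (coins : List (List Int)) (J N : Nat) (done rest : List (List Int))
    (hd : done.length = J + 1)
    (hprev : done.getD J [] = (List.range N).map (pvG (pvC coins) J)) :
    ∀ t k, k + t = N →
    ((List.range' k t).map (fun x : Nat => (x : Int))).foldl (pvBody coins ((J:Int)+1))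
      (done ++ (((List.range k).map (pvG (pvC coins) (J+1))) ++ List.replicate t (0:Int)) :: rest)
    = done ++ ((List.range N).map (pvG (pvC coins) (J+1))) :: rest := by
  intro t
  induction t with
  | zero => intro k hkN; subst hkN; simp
  | succ t ih =>
    intro k hkN
    rw [List.range'_succ]
    simp only [List.map_cons, List.foldl_cons]
    have ht : N - k = t + 1 := by omega
    rw [← ht, pvStepA_pos coins J N k done rest hd hprev (by omega)]
    have h2 : N - (k+1) = t := by omega
    rw [h2]
    exact ih (k+1) (by omega)

-- the inner loop of A over the remaining indices, row 0
lemma pvInnerA_zero (coins : List (List Int)) (N : Nat) (rest : List (List Int)) :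
    ∀ t k, 1 ≤ k → k + t = N →
    ((List.range' k t).map (fun x : Nat => (x : Int))).foldl (pvBody coins 0)
      ((((List.range k).map (pvG (pvC coins) 0)) ++ List.replicate t (0:Int)) :: rest)
    = (((List.range N).map (pvG (pvC coins) 0)) :: rest) := by
  intro t
  induction t with
  | zero => intro k hk1 hkN; subst hkN; simp
  | succ t ih =>
    intro k hk1 hkN
    rw [List.range'_succ]
    simp only [List.map_cons, List.foldl_cons]
    have ht : N - k = t + 1 := by omega
    rw [← ht, pvStepA_zero coins N k rest hk1 (by omega)]
    have h2 : N - (k+1) = t := by omega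
    rw [h2]
    exact ih (k+1) (by omega) (by omega)

-- pyRange 0 n 1 as a mapped Nat range
lemma pv_pyRange_cast (n : Int) :
    PySem.List.pyRange 0 n 1 = (List.range' 0 n.toNat).map (fun x : Nat => (x : Int)) := by
  rw [PySem.List.pyRange_one]
  have h : n - 0 = n := by ring
  rw [h, List.range_eq_range']
  apply List.map_congr_left
  intro x _
  simp

-- one outer-loop step, row 0
lemma pvOuterA_zero (coins : List (List Int)) (n : Int) (N : Nat) (hn : n = (N:Int)) (hN : 1 ≤ N)
    (rest : List (List Int)) :
    pvOuter coins n ((pvC coins 0 0 :: List.replicate (N-1) (0:Int)) :: rest) 0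
    = ((List.range N).map (pvG (pvC coins) 0)) :: rest := by
  unfold pvOuter
  rw [hn, pv_pyRange_cast]
  have h1 : ((N:Int)).toNat = N := by omega
  rw [h1]
  obtain ⟨N', rfl⟩ : ∃ N', N = N' + 1 := ⟨N - 1, by omega⟩
  rw [List.range'_succ]
  simp only [List.map_cons, List.foldl_cons]
  have step0 : pvBody coins 0 ((pvC coins 0 0 :: List.replicate (N'+1-1) (0:Int)) :: rest) ((0:Nat):Int)
      = (((List.range 1).map (pvG (pvC coins) 0)) ++ List.replicate (N'+1-1) (0:Int)) :: rest := by
    unfold pvBody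
    rw [if_pos (by norm_num)]
    simp [pvG, List.range_one]
  rw [step0]
  have h2 : N' + 1 - 1 = N' := by omega
  rw [h2]
  exact pvInnerA_zero coins (N'+1) rest N' 1 (by omega) (by omega)

-- one outer-loop step, row J+1
lemma pvOuterA_pos (coins : List (List Int)) (n : Int) (N : Nat) (hn : n = (N:Int))
    (J : Nat) (done rest : List (List Int))
    (hd : done.length = J + 1)
    (hprev : done.getD J [] = (List.range N).map (pvG (pvC coins) J)) :
    pvOuter coins n (done ++ (List.replicate N (0:Int)) :: rest) ((J:Int)+1)
    = done ++ ((List.range N).map (pvG (pvC coins) (J+1))) :: rest := by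
  unfold pvOuter
  rw [hn, pv_pyRange_cast]
  have h1 : ((N:Int)).toNat = N := by omega
  rw [h1]
  have h0 : (List.replicate N (0:Int)) = ((List.range 0).map (pvG (pvC coins) (J+1))) ++ List.replicate N 0 := by simp
  rw [h0]
  exact pvInnerA_pos coins J N done rest hd hprev N 0 (by omega)

-- the outer loop from row J ≥ 1 on
lemma pvOuterLoopA (coins : List (List Int)) (n : Int) (N : Nat) (hn : n = (N:Int)) :
    ∀ t J, 1 ≤ J →
    ((List.range' J t).map (fun x : Nat => (x : Int))).foldl (pvOuter coins n)
      ((List.range J).map (fun j => (List.range N).map (pvG (pvC coins) j))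
        ++ List.replicate t (List.replicate N (0:Int)))
    = (List.range (J+t)).map (fun j => (List.range N).map (pvG (pvC coins) j)) := by
  intro t
  induction t with
  | zero => intro J hJ; simp
  | succ t ih =>
    intro J hJ
    rw [List.range'_succ, List.replicate_succ]
    simp only [List.map_cons, List.foldl_cons]
    obtain ⟨J', rfl⟩ : ∃ J', J = J' + 1 := ⟨J - 1, by omega⟩
    have hcast : ((J'+1 : Nat) : Int) = ((J':Nat):Int) + 1 := by push_cast; ring
    rw [hcast, pvOuterA_pos coins n N hn J'
          ((List.range (J'+1)).map (fun j => (List.range N).map (pvG (pvC coins) j)))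
          (List.replicate t (List.replicate N 0))
          (by simp)
          (by rw [pv_getD_map_range _ _ _ (by omega)])]
    rw [pv_snoc (fun j => (List.range N).map (pvG (pvC coins) j)) (J'+1)]
    have h2 : J' + 1 + (t+1) = (J'+1+1) + t := by omega
    rw [h2]
    exact ih (J'+1+1) (by omega)

-- A's whole computation, evaluated
lemma pvA_eval (n m : Int) (coins : List (List Int)) (N M : Nat)
    (hn : n = (N:Int)) (hm : m = (M:Int)) (hN1 : 1 ≤ N) (hM1 : 1 ≤ M) :
    turtle_point_back n m coins = pvG (pvC coins) (M-1) (N-1) := by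
  obtain ⟨M', rfl⟩ : ∃ M', M = M' + 1 := ⟨M-1, by omega⟩
  obtain ⟨N', rfl⟩ : ∃ N', N = N' + 1 := ⟨N-1, by omega⟩
  subst hn hm
  simp only [Nat.add_sub_cancel]
  unfold turtle_point_back
  rw [if_neg (by push_cast; omega)]
  show pvAGet ((PySem.List.pyRange 0 (↑(M'+1)) 1).foldl (pvOuter coins (↑(N'+1)))
      (pvASet (List.replicate (M'+1) (List.replicate (N'+1) 0)) 0 0 (pvAGet coins 0 0)))
      ((↑(M'+1)) - 1) ((↑(N'+1)) - 1) = _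
  have e0 : pvAGet coins 0 0 = pvC coins 0 0 := by
    simp [pvAGet, pvC, PySem.List.pyGetD_zero]
  rw [e0]
  have einit : pvASet (List.replicate (M'+1) (List.replicate (N'+1) (0:Int))) 0 0 (pvC coins 0 0)
      = (pvC coins 0 0 :: List.replicate N' 0) :: List.replicate M' (List.replicate (N'+1) 0) := by
    rw [List.replicate_succ]
    rw [show (List.replicate (N'+1) (0:Int)) = 0 :: List.replicate N' 0 from List.replicate_succ ..]
    simp [pvASet, PySem.List.pySetD_of_nonneg, PySem.List.pyGetD_zero]
  rw [einit, pv_pyRange_cast]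
  rw [show ((↑(M'+1) : Int)).toNat = M'+1 from rfl]
  rw [List.range'_succ]
  simp only [List.map_cons, List.foldl_cons, Nat.cast_zero]
  have hOz := pvOuterA_zero coins (↑(N'+1)) (N'+1) rfl (by omega)
      (List.replicate M' (List.replicate (N'+1) 0))
  simp only [Nat.add_sub_cancel] at hOz
  rw [hOz]
  rw [show ((List.range (N'+1)).map (pvG (pvC coins) 0)) :: List.replicate M' (List.replicate (N'+1) (0:Int))
      = ((List.range 1).map (fun j => (List.range (N'+1)).map (pvG (pvC coins) j)))
        ++ List.replicate M' (List.replicate (N'+1) 0) from by simp]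
  rw [pvOuterLoopA coins (↑(N'+1)) (N'+1) rfl M' 1 (by omega)]
  have hm1 : ((↑(M'+1) : Int)) - 1 = ((M' : Nat) : Int) := by push_cast; ring
  have hn1 : ((↑(N'+1) : Int)) - 1 = ((N' : Nat) : Int) := by push_cast; ring
  rw [hm1, hn1, pvAGet_nat]
  rw [pv_getD_map_range _ _ _ (by omega), pv_getD_map_range _ _ _ (by omega)]

-- ---- B-side lemmas ----

-- the cache invariant: every stored value is the cell's true pvG value
def pvInv (coins : List (List Int)) (cache : PySem.Dict (Nat × Nat) Int) : Prop :=
  ∀ j i v, cache.get? (j, i) = some v → v = pvG (pvC coins) j i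

lemma pvInv_empty (coins : List (List Int)) : pvInv coins PySem.Dict.empty := by
  intro j i v h
  rw [PySem.Dict.get?_empty] at h
  cases h

lemma pvInv_insert (coins : List (List Int)) (cache : PySem.Dict (Nat × Nat) Int)
    (j i : Nat) (h : pvInv coins cache) (v : Int) (hv : v = pvG (pvC coins) j i) :
    pvInv coins (cache.insert (j, i) v) := by
  intro j' i' w hw
  rw [PySem.Dict.get?_insert] at hw
  by_cases he : (j', i') = ((j, i) : Nat × Nat)
  · rw [if_pos he] at hw
    have hj : j' = j := congrArg Prod.fst he
    have hi : i' = i := congrArg Prod.snd he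
    subst hj; subst hi
    cases hw
    exact hv
  · rw [if_neg he] at hw
    exact h j' i' w hw

lemma pvCell_eq (coins : List (List Int)) (j i : Nat) : pvCell coins j i = pvC coins j i := rfl

-- the recurrence Source B uses, re-expressed against pvG (A's update order)
lemma pvG_base (c : Nat → Nat → Int) : pvG c 0 0 = c 0 0 := by simp [pvG]

lemma pvG_left (c : Nat → Nat → Int) {i : Nat} (h : i ≠ 0) :
    max 0 (pvG c 0 (i-1) + c 0 i) = pvG c 0 i := by
  obtain ⟨i', rfl⟩ : ∃ i', i = i'+1 := ⟨i-1, by omega⟩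
  simp only [Nat.add_sub_cancel, pvG]
  omega

lemma pvG_up (c : Nat → Nat → Int) {j : Nat} (h : j ≠ 0) :
    max 0 (pvG c (j-1) 0 + c j 0) = pvG c j 0 := by
  obtain ⟨j', rfl⟩ : ∃ j', j = j'+1 := ⟨j-1, by omega⟩
  simp only [Nat.add_sub_cancel, pvG]
  omega

lemma pvG_both (c : Nat → Nat → Int) {j i : Nat} (hj : j ≠ 0) (hi : i ≠ 0) :
    max 0 (max (pvG c j (i-1)) (pvG c (j-1) i) + c j i) = pvG c j i := by
  obtain ⟨j', rfl⟩ : ∃ j', j = j'+1 := ⟨j-1, by omega⟩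
  obtain ⟨i', rfl⟩ : ∃ i', i = i'+1 := ⟨i-1, by omega⟩
  simp only [Nat.add_sub_cancel, pvG]
  omega

-- memoized recursion computes pvG and preserves the invariant
lemma pvValue_spec (coins : List (List Int)) :
    ∀ fuel j i cache, j + i ≤ fuel → pvInv coins cache →
      (pvValue coins j i cache).1 = pvG (pvC coins) j i ∧ pvInv coins (pvValue coins j i cache).2 := by
  intro fuel
  induction fuel with
  | zero =>
    intro j i cache hle hinv
    have hj : j = 0 := by omega
    have hi : i = 0 := by omega
    by_cases hc : (cache.get? (j, i)).isSome
    · obtain ⟨v, hv⟩ := Option.isSome_iff_exists.mp hc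
      rw [pvValue]; simp only [if_pos hc]
      refine ⟨?_, hinv⟩
      rw [PySem.Dict.getD_eq_get?_getD, hv, Option.getD_some, hinv j i v hv]
    · rw [pvValue]
      simp only [if_neg hc]
      rw [dif_pos (⟨hj, hi⟩ : j = 0 ∧ i = 0)]
      subst hj; subst hi
      refine ⟨?_, pvInv_insert coins cache 0 0 hinv _ (by rw [pvCell_eq, pvG_base])⟩
      rw [PySem.Dict.getD_insert_self, pvCell_eq, pvG_base]
  | succ f ih =>
    intro j i cache hle hinv
    by_cases hc : (cache.get? (j, i)).isSome
    · obtain ⟨v, hv⟩ := Option.isSome_iff_exists.mp hc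
      rw [pvValue]; simp only [if_pos hc]
      refine ⟨?_, hinv⟩
      rw [PySem.Dict.getD_eq_get?_getD, hv, Option.getD_some, hinv j i v hv]
    · by_cases h0 : j = 0 ∧ i = 0
      · rw [pvValue]
        simp only [if_neg hc]
        rw [dif_pos h0]
        obtain ⟨rfl, rfl⟩ := h0
        refine ⟨?_, pvInv_insert coins cache 0 0 hinv _ (by rw [pvCell_eq, pvG_base])⟩
        rw [PySem.Dict.getD_insert_self, pvCell_eq, pvG_base]
      · by_cases hj : j = 0
        · have hi : i ≠ 0 := fun h => h0 ⟨hj, h⟩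
          rw [pvValue]
          simp only [if_neg hc]
          rw [dif_neg h0, dif_pos hj]
          subst hj
          obtain ⟨hval, hinv'⟩ := ih 0 (i-1) cache (by omega) hinv
          have hstored : max 0 ((pvValue coins 0 (i-1) cache).1 + pvCell coins 0 i)
              = pvG (pvC coins) 0 i := by
            rw [hval, pvCell_eq]; exact pvG_left (pvC coins) hi
          exact ⟨by rw [PySem.Dict.getD_insert_self, hstored],
                 pvInv_insert coins _ 0 i hinv' _ hstored⟩
        · by_cases hi : i = 0
          · rw [pvValue]
            simp only [if_neg hc]
            rw [dif_neg h0, dif_neg hj, dif_pos hi]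
            subst hi
            obtain ⟨hval, hinv'⟩ := ih (j-1) 0 cache (by omega) hinv
            have hstored : max 0 ((pvValue coins (j-1) 0 cache).1 + pvCell coins j 0)
                = pvG (pvC coins) j 0 := by
              rw [hval, pvCell_eq]; exact pvG_up (pvC coins) hj
            exact ⟨by rw [PySem.Dict.getD_insert_self, hstored],
                   pvInv_insert coins _ j 0 hinv' _ hstored⟩
          · rw [pvValue]
            simp only [if_neg hc]
            rw [dif_neg h0, dif_neg hj, dif_neg hi]
            obtain ⟨hvalA, hinvA⟩ := ih j (i-1) cache (by omega) hinv
            obtain ⟨hvalB, hinvB⟩ :=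
              ih (j-1) i (pvValue coins j (i-1) cache).2 (by omega) hinvA
            have hstored :
                max 0 (max (pvValue coins j (i-1) cache).1
                    (pvValue coins (j-1) i (pvValue coins j (i-1) cache).2).1 + pvCell coins j i)
                = pvG (pvC coins) j i := by
              rw [hvalA, hvalB, pvCell_eq]; exact pvG_both (pvC coins) hj hi
            exact ⟨by rw [PySem.Dict.getD_insert_self, hstored],
                   pvInv_insert coins _ j i hinvB _ hstored⟩

-- B's whole computation, evaluated
lemma pvB_eval (n m : Int) (coins : List (List Int)) (N M : Nat)
    (hn : n = (N:Int)) (hm : m = (M:Int)) (hN1 : 1 ≤ N) (hM1 : 1 ≤ M) :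
    turtle_point_back_alt n m coins = pvG (pvC coins) (M-1) (N-1) := by
  subst hn hm
  unfold turtle_point_back_alt
  rw [if_neg (by omega)]
  have h1 : (((M:Int)) - 1).toNat = M - 1 := by omega
  have h2 : (((N:Int)) - 1).toNat = N - 1 := by omega
  rw [h1, h2]
  exact (pvValue_spec coins ((M-1)+(N-1)) (M-1) (N-1) PySem.Dict.empty (le_refl _) (pvInv_empty coins)).1

-- ===== VERDICT (by name: the statement is the Claim_ definition above) =====
theorem turtle_point_back_spec : Claim_equal_turtle_point_back := by
  intro n m coins _ hpre
  unfold Spec_turtle_point_back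
  by_cases hnm : n ≤ 0 ∨ m ≤ 0
  · unfold turtle_point_back turtle_point_back_alt
    rw [if_pos hnm, if_pos hnm]
  · have hn : n = (n.toNat : Int) := by omega
    have hm : m = (m.toNat : Int) := by omega
    rw [pvA_eval n m coins n.toNat m.toNat hn hm (by omega) (by omega),
        pvB_eval n m coins n.toNat m.toNat hn hm (by omega) (by omega)]
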